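-- pv_equiv track=rewrite | github.com/zhangyuejoslin/Cornll2012_SRL | data_helper/prediction_builder.py | labels_to_output
-- ===== SOURCE A (Python) =====
-- def labels_to_output(labels):
--     in_span = False
--     output = []
--     for i, label in enumerate(labels):
--
--         out_label = "*"
--         if label.startswith('B'): # start span
--             in_span = True
--             formatted_span_name = label[2:].replace('ARG', 'A')
--             out_label = f'({formatted_span_name}' + out_label
--
--         if i < len(labels) -1 and in_span and not labels[i+1].startswith('I'):
--             in_span = False
--             out_label = out_label + ')'
--
--         if in_span and i == len(labels) - 1:
--             out_label = out_label +  ')'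
--
--         output.append(out_label)
--     return output
-- ===== SOURCE B (Python) =====
-- def labels_to_output(labels):
--     n = len(labels)
--     output = []
--     i = 0
--     while i < n:
--         if labels[i].startswith('B'):
--             output.append('(' + labels[i][2:].replace('ARG', 'A') + '*')
--             while i + 1 < n and labels[i + 1].startswith('I'):
--                 output.append('*')
--                 i += 1
--             output[-1] += ')'
--         else:
--             output.append('*')
--         i += 1
--     return output
-- ===== Notes on version B (the rewrite author's own statement) =====
-- stated objective: alternative
-- what changed: Replaced A's stateful single pass (in_span flag plus lookahead at labels[i+1] and a separate last-position closing case) by a span-at-a-time loop: open a bracket at each 'B' label, consume the run of following 'I' labels emitting '*', then close on the last element of the span; non-span positions are emitted directly.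
import Mathlib
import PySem

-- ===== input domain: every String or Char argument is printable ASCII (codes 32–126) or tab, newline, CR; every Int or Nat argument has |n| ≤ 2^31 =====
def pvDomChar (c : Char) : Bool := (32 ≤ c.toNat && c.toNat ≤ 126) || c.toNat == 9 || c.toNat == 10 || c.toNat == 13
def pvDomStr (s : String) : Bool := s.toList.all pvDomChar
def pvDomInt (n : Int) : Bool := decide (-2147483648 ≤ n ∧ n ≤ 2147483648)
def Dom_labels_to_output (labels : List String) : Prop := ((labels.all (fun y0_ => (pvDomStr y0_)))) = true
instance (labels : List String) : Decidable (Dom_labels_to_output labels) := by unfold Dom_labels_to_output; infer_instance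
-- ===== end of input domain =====

-- B replaces A's stateful in_span flag + lookahead single pass by a span-at-a-time loop
-- (open at each 'B', consume the following 'I' run, close the last element); same cost, simpler control flow.

-- ===== PORT A =====
-- label[2:].replace('ARG', 'A')  (shared by both ports: the identical expression occurs in Source A and Source B)
def fmtName (label : String) : String :=
  PySem.Str.replace (PySem.Str.slice label (some 2) none) "ARG" "A"

-- one iteration of A's for-loop; labels[i+1] is read with pyGetD, only evaluated under the guard i < n-1 where it is in range
def stepA (labels : List String) (st : Bool × List String) (p : Int × String) : Bool × List String :=
  let n : Int := labels.length
  let s1 := if PySem.Str.startswith p.2 "B" = true then true else st.1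
  let o1 := if PySem.Str.startswith p.2 "B" = true then "(" ++ fmtName p.2 ++ "*" else "*"
  let c : Prop := p.1 < n - 1 ∧ s1 = true ∧ ¬ (PySem.Str.startswith (PySem.List.pyGetD labels (p.1 + 1) "") "I" = true)
  let s2 := if c then false else s1
  let o2 := if c then o1 ++ ")" else o1
  let o3 := if s2 = true ∧ p.1 = n - 1 then o2 ++ ")" else o2
  (s2, st.2 ++ [o3])

def labels_to_output (labels : List String) : List String :=
  ((PySem.List.enumerate labels 0).foldl (stepA labels) (false, [])).2

-- ===== PORT B =====
-- inner while of Source B: one '*' per leading 'I' label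
def spanStars : List String → List String
  | [] => []
  | l :: rest => if PySem.Str.startswith l "I" = true then "*" :: spanStars rest else []

-- output[-1] += ')'
def closeLast : List String → List String
  | [] => []
  | [x] => [x ++ ")"]
  | x :: xs => x :: closeLast xs

def labels_to_output_alt (labels : List String) : List String :=
  match labels with
  | [] => []
  | l :: rest =>
    if PySem.Str.startswith l "B" = true then
      let stars := spanStars rest
      closeLast (("(" ++ fmtName l ++ "*") :: stars) ++ labels_to_output_alt (rest.drop stars.length)
    else "*" :: labels_to_output_alt rest
termination_by labels.length
decreasing_by
  · have : (rest.drop (spanStars rest).length).length ≤ rest.length := by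
      simp [List.length_drop]
    simp only [List.length_cons]; omega
  · simp


-- ===== PRECONDITION & SPEC =====
def Spec_labels_to_output (labels : List String) (out : List String) : Prop := out = labels_to_output_alt labels
instance (labels : List String) (out : List String) : Decidable (Spec_labels_to_output labels out) := by unfold Spec_labels_to_output; infer_instance

-- ===== CLAIM (what is proved, stated in full; the proofs are below) =====
def Claim_equal_labels_to_output : Prop := ∀ (labels : List String), Dom_labels_to_output labels → Spec_labels_to_output labels (labels_to_output labels)

-- ===== LEMMAS AND PROOFS =====

-- recursion-friendly reformulation of A's fold (proof device)
def auxA : Bool → List String → List String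
  | _, [] => []
  | s, l :: rest =>
    let s' := if PySem.Str.startswith l "B" = true then true else s
    let out := if PySem.Str.startswith l "B" = true then "(" ++ fmtName l ++ "*" else "*"
    match rest with
    | [] => [if s' = true then out ++ ")" else out]
    | next :: _ =>
      let close := s' = true ∧ ¬ (PySem.Str.startswith next "I" = true)
      (if close then out ++ ")" else out) :: auxA (if close then false else s') rest

lemma foldA_eq_auxA (labels : List String) :
    ∀ (suffix : List String) (i : Nat) (s : Bool) (acc : List String),
      labels.drop i = suffix →
      ((PySem.List.enumerate suffix (i : Int)).foldl (stepA labels) (s, acc)).2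
        = acc ++ auxA s suffix := by
  intro suffix
  induction suffix with
  | nil => intro i s acc _; simp [PySem.List.enumerate_nil, auxA]
  | cons l rest IH =>
    intro i s acc h
    have hlen : labels.length = i + rest.length + 1 := by
      have := congrArg List.length h
      simp only [List.length_drop, List.length_cons] at this
      omega
    have hdrop : labels.drop (i + 1) = rest := by
      rw [← List.tail_drop, h]; rfl
    have hcast : (i : Int) + 1 = ((i + 1 : Nat) : Int) := by push_cast; ring
    rw [PySem.List.enumerate_cons, List.foldl_cons]
    cases rest with
    | nil =>
      have hc : ¬ ((i : Int) < (labels.length : Int) - 1 ∧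
          (if PySem.Str.startswith l "B" = true then true else s) = true ∧
          ¬ (PySem.Str.startswith (PySem.List.pyGetD labels ((i : Int) + 1) "") "I" = true)) := by
        rintro ⟨h1, -, -⟩
        simp only [List.length_nil] at hlen
        omega
      have hi : (i : Int) = (labels.length : Int) - 1 := by
        simp only [List.length_nil] at hlen
        omega
      simp only [stepA, PySem.List.enumerate_nil, List.foldl_nil, auxA, if_neg hc]
      simp [hi]
    | cons next rest2 =>
      have h1 : (i : Int) < (labels.length : Int) - 1 := by
        simp only [List.length_cons] at hlen
        omega
      have hnext : PySem.List.pyGetD labels ((i : Int) + 1) "" = next := by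
        rw [hcast, PySem.List.pyGetD_natCast]
        have hg : labels[i + 1]? = some next := by
          have := List.getElem?_drop (xs := labels) (i := i + 1) (j := 0)
          rw [hdrop] at this
          simpa using this.symm
        simp [List.getD, hg]
      have hlast : ¬ ((i : Int) = (labels.length : Int) - 1) := by
        simp only [List.length_cons] at hlen
        omega
      simp only [stepA, hnext, h1, true_and]
      rw [hcast, IH (i + 1) _ _ hdrop]
      simp only [auxA, hlast, and_false, if_false, List.append_assoc, List.cons_append,
        List.nil_append]

lemma not_B_of_I (y : String) (h : PySem.Str.startswith y "I" = true) :
    PySem.Str.startswith y "B" = false := by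
  by_contra hB
  rw [Bool.not_eq_false] at hB
  have hI' : ("I".toList) <+: y.toList := by
    rw [← PySem.Chars.startswith_iff]
    simpa [show "I".toList = ['I'] from rfl] using h
  have hB' : ("B".toList) <+: y.toList := by
    rw [← PySem.Chars.startswith_iff]
    simpa [show "B".toList = ['B'] from rfl] using hB
  obtain ⟨t, ht⟩ := hI'
  obtain ⟨u, hu⟩ := hB'
  rw [← ht] at hu
  simp [show "I".toList = ['I'] from rfl, show "B".toList = ['B'] from rfl] at hu

lemma closeLast_cons_of_ne (x : String) (xs : List String) (h : xs ≠ []) :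
    closeLast (x :: xs) = x :: closeLast xs := by
  cases xs with
  | nil => exact absurd rfl h
  | cons y ys => rfl

lemma spanStars_ne_nil (y : String) (ys : List String) (h : PySem.Str.startswith y "I" = true) :
    spanStars (y :: ys) ≠ [] := by
  simp only [spanStars, h, if_true]
  exact List.cons_ne_nil _ _

lemma auxA_alt_big : ∀ n : Nat,
    (∀ ls : List String, ls.length = n → auxA false ls = labels_to_output_alt ls) ∧
    (∀ (y : String) (ys : List String), (y :: ys).length = n →
      PySem.Str.startswith y "I" = true →
      auxA true (y :: ys)
        = closeLast (spanStars (y :: ys))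
            ++ labels_to_output_alt ((y :: ys).drop (spanStars (y :: ys)).length)) := by
  intro n
  induction n using Nat.strong_induction_on with
  | _ n IH =>
    constructor
    · intro ls hlen
      cases ls with
      | nil => rw [labels_to_output_alt]; rfl
      | cons l rest =>
        rw [labels_to_output_alt, auxA.eq_def]
        by_cases hB : PySem.Str.startswith l "B" = true
        · cases rest with
          | nil =>
            simp only [hB, if_true, spanStars, closeLast, List.length_nil, List.drop_zero]
            rw [labels_to_output_alt]
            simp
          | cons next rest2 =>
            by_cases hI : PySem.Str.startswith next "I" = true
            · have hQ := (IH (next :: rest2).length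
                (by simp only [List.length_cons] at hlen ⊢; omega)).2 next rest2 rfl hI
              simp only [hB, hI, if_true, not_true, and_false, if_false]
              rw [hQ, closeLast_cons_of_ne _ _ (spanStars_ne_nil next rest2 hI)]
              simp
            · have hP := (IH (next :: rest2).length
                (by simp only [List.length_cons] at hlen ⊢; omega)).1 (next :: rest2) rfl
              simp only [hB, hI, if_true, true_and, Bool.false_eq_true, not_false_eq_true]
              rw [hP]
              simp only [spanStars, hI, Bool.false_eq_true, if_false, closeLast]
              rfl
        · cases rest with
          | nil =>
            simp only [hB, Bool.false_eq_true, if_false]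
            rw [labels_to_output_alt]
          | cons next rest2 =>
            have hP := (IH (next :: rest2).length
              (by simp only [List.length_cons] at hlen ⊢; omega)).1 (next :: rest2) rfl
            simp only [hB, Bool.false_eq_true, if_false, false_and]
            rw [hP]
    · intro y ys hlen hI
      have hB := not_B_of_I y hI
      rw [auxA.eq_def]
      cases ys with
      | nil =>
        simp only [hB, Bool.false_eq_true, if_false, spanStars, hI, if_true, closeLast,
          List.length_cons, List.length_nil, List.drop_succ_cons, List.drop_zero]
        rw [labels_to_output_alt]
        simp
      | cons z zs =>
        by_cases hzI : PySem.Str.startswith z "I" = true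
        · have hQ := (IH (z :: zs).length
            (by simp only [List.length_cons] at hlen ⊢; omega)).2 z zs rfl hzI
          simp only [hB, hzI, Bool.false_eq_true, if_false, ite_self, not_true, and_false]
          rw [hQ]
          conv_rhs => rw [show spanStars (y :: z :: zs) = "*" :: spanStars (z :: zs) by
            simp only [spanStars, hI, if_true]]
          rw [closeLast_cons_of_ne _ _ (spanStars_ne_nil z zs hzI)]
          simp
        · have hP := (IH (z :: zs).length
            (by simp only [List.length_cons] at hlen ⊢; omega)).1 (z :: zs) rfl
          simp only [hB, hzI, Bool.false_eq_true, if_false, ite_self, true_and,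
            not_false_eq_true, if_true]
          rw [hP]
          simp only [spanStars, hI, hzI, Bool.false_eq_true, if_true, if_false, closeLast]
          rfl

lemma auxA_eq_alt : ∀ (ls : List String), auxA false ls = labels_to_output_alt ls := by
  intro ls
  exact (auxA_alt_big ls.length).1 ls rfl

-- ===== VERDICT (by name: the statement is the Claim_ definition above) =====
theorem labels_to_output_spec : Claim_equal_labels_to_output := by
  intro labels _
  unfold Spec_labels_to_output labels_to_output
  rw [show ((0 : Int)) = ((0 : Nat) : Int) by norm_num,
      foldA_eq_auxA labels labels 0 false [] (by simp)]
  simp [auxA_eq_alt]
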